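-- pv_equiv track=rewrite | github.com/zainab-gilani/WebScraper | models/EntryRequirement.py | calculate_btec_points
-- ===== SOURCE A (Python) =====
-- BTEC_GRADE_VALUES = {
--     'D*': 56,  # Distinction* (highest)
--     'D': 48,  # Distinction
--     'M': 32,  # Merit
--     'P': 16  # Pass (lowest)
-- }
--
-- def calculate_btec_points(grades: str) -> int:
--     """
--     Calculate BTEC points from grade string.
--     For example: "DDD" = 144 points, "DMM" = 112 points, "D*D*D*" = 168 points.
--
--     :param grades: A string of BTEC grades (e.g., "DDD", "DMM", "D*D*D*")
--     :return: The total UCAS points for these BTEC grades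
--     """
--     if not grades:
--         return 0
--     # endif
--
--     total = 0
--
--     # Normalize by capitalizing it always
--     grades = grades.upper()
--
--     # Handle D* grades first as it's different
--     # from the single letter grades
--     while 'D*' in grades:
--         total += BTEC_GRADE_VALUES['D*']
--
--         # remove it once handled
--         grades = grades.replace('D*', '', 1)
--     # endwhile
--
--     # Process remaining single grades
--     for grade in grades:
--         if grade in BTEC_GRADE_VALUES:
--             total += BTEC_GRADE_VALUES[grade]
--         # endif
--     # endfor
--
--     return total
-- ===== SOURCE B (Python) =====
-- def calculate_btec_points(grades: str) -> int:
--     # One left-to-right pass with a character stack: '*' after a pending 'D'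
--     # completes a D* (56); leftover characters score D=48, M=32, P=16.
--     SINGLE = {'D': 48, 'M': 32, 'P': 16}
--     total = 0
--     stack = []
--     for ch in grades.upper():
--         if ch == '*' and stack and stack[-1] == 'D':
--             stack.pop()
--             total += 56
--         else:
--             stack.append(ch)
--     for ch in stack:
--         total += SINGLE.get(ch, 0)
--     return total
-- ===== Notes on version B (the rewrite author's own statement) =====
-- stated objective: alternative
-- what changed: Replaces A's repeated substring-search-and-replace while-loop over 'D*' (rescanning the string after each removal) by a single left-to-right pass with a character stack that matches each '*' with a pending 'D' and scores leftovers directly.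
import Mathlib
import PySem

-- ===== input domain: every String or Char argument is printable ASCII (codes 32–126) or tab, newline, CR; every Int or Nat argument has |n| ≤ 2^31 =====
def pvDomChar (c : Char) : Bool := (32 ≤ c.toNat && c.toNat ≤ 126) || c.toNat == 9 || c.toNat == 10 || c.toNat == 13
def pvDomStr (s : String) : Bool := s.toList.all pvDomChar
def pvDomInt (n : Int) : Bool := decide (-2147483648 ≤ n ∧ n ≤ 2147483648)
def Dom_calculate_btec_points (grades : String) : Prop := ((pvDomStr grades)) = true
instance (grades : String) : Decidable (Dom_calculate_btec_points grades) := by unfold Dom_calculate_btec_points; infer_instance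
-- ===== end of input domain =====

-- B replaces A's repeated 'D*' search-and-remove rescans by one stack-based pass (objective: alternative).


-- ===== PORT A =====

-- BTEC_GRADE_VALUES; string keys are ported as List Char (strings are ported through List Char)
def BTEC_GRADE_VALUES : PySem.Dict (List Char) Int :=
  PySem.Dict.ofList [(['D','*'], 56), (['D'], 48), (['M'], 32), (['P'], 16)]

-- grades.replace('D*', '', 1): PySem.Str.replace has no count argument, so the count=1
-- form is ported by hand: remove the LEFTMOST adjacent 'D','*' pair (exact)
def pvRemoveFirstDStar : List Char → List Char
  | [] => []
  | [c] => [c]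
  | a :: b :: rest => if a = 'D' ∧ b = '*' then rest else a :: pvRemoveFirstDStar (b :: rest)

-- helper for the while-loop's termination proof (also used by the proofs below)
def pvHasDStar : List Char → Bool
  | [] => false
  | [_] => false
  | a :: b :: rest => (a = 'D' && b = '*') || pvHasDStar (b :: rest)

theorem pvHasDStar_iff (l : List Char) : pvHasDStar l = true ↔ ['D','*'] <:+: l := by
  induction l with
  | nil => simp [pvHasDStar]
  | cons a l ih =>
    cases l with
    | nil =>
      simp only [pvHasDStar, Bool.false_eq_true, false_iff]
      intro h
      have := h.length_le
      simp at this
    | cons b rest =>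
      rw [List.infix_cons_iff]
      simp only [pvHasDStar, Bool.or_eq_true, decide_eq_true_eq, Bool.and_eq_true, ih,
        List.cons_prefix_cons]
      constructor
      · rintro (⟨rfl, rfl⟩ | h)
        · exact Or.inl ⟨rfl, by simp⟩
        · exact Or.inr h
      · rintro (⟨rfl, h⟩ | h)
        · exact Or.inl ⟨rfl, h.1.symm⟩
        · exact Or.inr h

theorem pvIsIn_eq_hasDStar (l : List Char) : PySem.Chars.isIn ['D','*'] l = pvHasDStar l := by
  by_cases h : pvHasDStar l = true
  · rw [h, PySem.Chars.isIn_iff_infix]; exact (pvHasDStar_iff l).mp h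
  · rw [Bool.not_eq_true] at h
    rw [h, PySem.Chars.isIn_eq_false_iff]
    intro hc
    rw [← pvHasDStar_iff] at hc
    simp [h] at hc

theorem pvRemoveFirst_length_lt (l : List Char) (h : pvHasDStar l = true) :
    (pvRemoveFirstDStar l).length < l.length := by
  induction l with
  | nil => simp [pvHasDStar] at h
  | cons a l ih =>
    cases l with
    | nil => simp [pvHasDStar] at h
    | cons b rest =>
      by_cases hd : a = 'D' ∧ b = '*'
      · simp [pvRemoveFirstDStar, hd]
      · simp only [pvHasDStar, Bool.or_eq_true, Bool.and_eq_true, decide_eq_true_eq] at h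
        rcases h with h' | h'
        · exact absurd h' hd
        · simp only [pvRemoveFirstDStar, hd, if_false, List.length_cons]
          have := ih h'
          simp only [List.length_cons] at this ⊢
          omega

-- the dict-membership test + lookup of A's final for-loop body
def pvAStep (t : Int) (c : Char) : Int :=
  if BTEC_GRADE_VALUES.contains [c] then t + BTEC_GRADE_VALUES.getD [c] 0 else t

-- while 'D*' in grades: total += BTEC_GRADE_VALUES['D*']; grades = grades.replace('D*','',1)
def pvAWhile (l : List Char) (total : Int) : List Char × Int :=
  if h : PySem.Chars.isIn ['D','*'] l = true then
    pvAWhile (pvRemoveFirstDStar l) (total + 56)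
  else (l, total)
termination_by l.length
decreasing_by exact pvRemoveFirst_length_lt l (by rw [← pvIsIn_eq_hasDStar]; exact h)

def calculate_btec_points (grades : String) : Int :=
  if grades.toList = [] then 0
  else
    let gs := PySem.Chars.upper grades.toList
    let p := pvAWhile gs 0
    p.1.foldl pvAStep p.2

-- ===== PORT B =====

def pvSINGLE : PySem.Dict Char Int := PySem.Dict.ofList [('D', 48), ('M', 32), ('P', 16)]

-- B's for-loop; the stack is kept with its TOP at the head (Python appends/pops at the end)
def pvBLoop : List Char → List Char → Int → (List Char × Int)
  | [], stack, t => (stack, t)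
  | c :: rest, stack, t =>
    if c = '*' ∧ stack.head? = some 'D' then pvBLoop rest stack.tail (t + 56)
    else pvBLoop rest (c :: stack) t

def calculate_btec_points_alt (grades : String) : Int :=
  let p := pvBLoop (PySem.Chars.upper grades.toList) [] 0
  -- Python's leftover loop walks the stack bottom-to-top: that is p.1.reverse here
  p.1.reverse.foldl (fun t c => t + pvSINGLE.getD c 0) p.2

-- ===== PRECONDITION & SPEC =====
def Spec_calculate_btec_points (grades : String) (out : Int) : Prop := out = calculate_btec_points_alt grades
instance (grades : String) (out : Int) : Decidable (Spec_calculate_btec_points grades out) := by unfold Spec_calculate_btec_points; infer_instance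

-- ===== CLAIM (what is proved, stated in full; the proofs are below) =====
def Claim_equal_calculate_btec_points : Prop := ∀ (grades : String), Dom_calculate_btec_points grades → Spec_calculate_btec_points grades (calculate_btec_points grades)

-- ===== LEMMAS AND PROOFS =====

-- points one leftover character is worth
def pvδ (c : Char) : Int := pvSINGLE.getD c 0

-- B's result as a function of the uppercased character list
def pvBRes (l : List Char) : Int :=
  ((pvBLoop l [] 0).1).reverse.foldl (fun t c => t + pvSINGLE.getD c 0) (pvBLoop l [] 0).2

theorem pvMkA : BTEC_GRADE_VALUES = PySem.Dict.mk [(['D','*'], 56), (['D'], 48), (['M'], 32), (['P'], 16)] := by decide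
theorem pvMkS : pvSINGLE = PySem.Dict.mk [('D', 48), ('M', 32), ('P', 16)] := by decide

-- A's membership-guarded lookup of a one-character key agrees with B's single-grade table
theorem pvAStep_eq (t : Int) (c : Char) : pvAStep t c = t + pvδ c := by
  by_cases hD : c = 'D'
  · subst hD; simp [pvAStep, pvδ]
    norm_num [pvMkA, pvMkS, PySem.Dict.contains_mk, PySem.Dict.getD_eq_get?_getD, PySem.Dict.get?_mk_cons]
  by_cases hM : c = 'M'
  · subst hM; simp [pvAStep, pvδ]
    norm_num [pvMkA, pvMkS, PySem.Dict.contains_mk, PySem.Dict.getD_eq_get?_getD, PySem.Dict.get?_mk_cons]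
  by_cases hP : c = 'P'
  · subst hP; simp [pvAStep, pvδ]
    norm_num [pvMkA, pvMkS, PySem.Dict.contains_mk, PySem.Dict.getD_eq_get?_getD, PySem.Dict.get?_mk_cons]
  · have h1 : ¬('D' = c) := fun h => hD h.symm
    have h2 : ¬('M' = c) := fun h => hM h.symm
    have h3 : ¬('P' = c) := fun h => hP h.symm
    simp [pvAStep, pvδ]
    norm_num [pvMkA, pvMkS, PySem.Dict.contains_mk, PySem.Dict.getD_eq_get?_getD, PySem.Dict.get?_mk_cons,
      PySem.Dict.get?_empty, PySem.Dict.get?, h1, h2, h3]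

theorem pvFoldl_astep (l : List Char) : ∀ t : Int, l.foldl pvAStep t = t + (l.map pvδ).sum := by
  induction l with
  | nil => intro t; simp
  | cons c rest ih =>
    intro t
    simp only [List.foldl_cons, List.map_cons, List.sum_cons, pvAStep_eq, ih]
    ring

-- accumulator linearity of the B loop
theorem pvBLoop_acc (l : List Char) : ∀ (s : List Char) (t : Int),
    pvBLoop l s t = ((pvBLoop l s 0).1, (pvBLoop l s 0).2 + t) := by
  induction l with
  | nil => intro s t; simp [pvBLoop]
  | cons c rest ih =>
    intro s t
    by_cases h : c = '*' ∧ s.head? = some 'D'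
    · simp only [pvBLoop, if_pos h]
      rw [ih s.tail (t + 56), ih s.tail (0 + 56)]
      simp; omega
    · simp only [pvBLoop, if_neg h]
      exact ih (c :: s) t

-- removing the leftmost adjacent 'D','*' pair shifts the B loop's total by exactly 56
theorem pvBLoop_rm (l : List Char) : ∀ (s : List Char) (t : Int), pvHasDStar l = true →
    pvBLoop l s t = pvBLoop (pvRemoveFirstDStar l) s (t + 56) := by
  induction l with
  | nil => intro s t h; simp [pvHasDStar] at h
  | cons a l ih =>
    intro s t h
    cases l with
    | nil => simp [pvHasDStar] at h
    | cons b rest =>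
      by_cases hd : a = 'D' ∧ b = '*'
      · obtain ⟨rfl, rfl⟩ := hd
        simp [pvRemoveFirstDStar, pvBLoop]
      · simp only [pvHasDStar, Bool.or_eq_true, Bool.and_eq_true, decide_eq_true_eq] at h
        rcases h with h' | h'
        · exact absurd h' hd
        · simp only [pvRemoveFirstDStar, hd, if_false]
          by_cases hs : a = '*' ∧ s.head? = some 'D'
          · simp only [pvBLoop, if_pos hs]
            exact ih s.tail (t + 56) h'
          · simp only [pvBLoop, if_neg hs]
            exact ih (a :: s) t h'

-- on a pair-free list the B loop only pushes
theorem pvBLoop_nored (l : List Char) : ∀ (s : List Char) (t : Int), pvHasDStar l = false →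
    (l.head? = some '*' → s.head? ≠ some 'D') →
    pvBLoop l s t = (l.reverse ++ s, t) := by
  induction l with
  | nil => intro s t _ _; simp [pvBLoop]
  | cons a l ih =>
    intro s t h hg
    have hs : ¬ (a = '*' ∧ s.head? = some 'D') := by
      rintro ⟨rfl, hd⟩; exact hg rfl hd
    simp only [pvBLoop, if_neg hs]
    have hl : pvHasDStar l = false := by
      cases l with
      | nil => rfl
      | cons b rest =>
        simp only [pvHasDStar, Bool.or_eq_false_iff] at h
        exact h.2
    rw [ih (a :: s) t hl ?_]
    · simp
    · intro hhead hcons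
      cases l with
      | nil => simp at hhead
      | cons b rest =>
        simp only [List.head?_cons, Option.some.injEq] at hhead hcons
        subst hhead hcons
        simp [pvHasDStar] at h

theorem pvFoldl_bstep (l : List Char) : ∀ t : Int,
    l.foldl (fun t c => t + pvSINGLE.getD c 0) t = t + (l.map pvδ).sum := by
  induction l with
  | nil => intro t; simp
  | cons c rest ih =>
    intro t
    simp only [List.foldl_cons, List.map_cons, List.sum_cons, pvδ, ih]
    ring

theorem pvBRes_rm (l : List Char) (h : pvHasDStar l = true) :
    pvBRes l = 56 + pvBRes (pvRemoveFirstDStar l) := by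
  unfold pvBRes
  rw [pvBLoop_rm l [] 0 h, pvBLoop_acc (pvRemoveFirstDStar l) [] (0 + 56)]
  simp only []
  rw [pvFoldl_bstep, pvFoldl_bstep]
  omega

-- A's while loop followed by its scoring loop, on a pair-free list
theorem pvNored (l : List Char) (t : Int) (h : pvHasDStar l = false) :
    ((pvAWhile l t).1).foldl pvAStep (pvAWhile l t).2 = t + pvBRes l := by
  have hA : pvAWhile l t = (l, t) := by
    rw [pvAWhile]; simp [pvIsIn_eq_hasDStar, h]
  have hB : pvBLoop l [] 0 = (l.reverse, 0) := by
    simpa using pvBLoop_nored l [] 0 h (by simp)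
  rw [hA]
  unfold pvBRes
  rw [hB]
  simp only [List.reverse_reverse]
  rw [pvFoldl_astep, pvFoldl_bstep]
  omega

theorem pvMain (n : Nat) : ∀ (l : List Char) (t : Int), l.length ≤ n →
    ((pvAWhile l t).1).foldl pvAStep (pvAWhile l t).2 = t + pvBRes l := by
  induction n with
  | zero =>
    intro l t hl
    have hnil : l = [] := by cases l with | nil => rfl | cons a l => simp at hl
    subst hnil
    exact pvNored [] t rfl
  | succ n ih =>
    intro l t hl
    by_cases h : pvHasDStar l = true
    · have hA : pvAWhile l t = pvAWhile (pvRemoveFirstDStar l) (t + 56) := by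
        rw [pvAWhile]; simp [pvIsIn_eq_hasDStar, h]
      have hlen : (pvRemoveFirstDStar l).length ≤ n := by
        have := pvRemoveFirst_length_lt l h; omega
      rw [hA, ih (pvRemoveFirstDStar l) (t + 56) hlen, pvBRes_rm l h]
      ring
    · exact pvNored l t (Bool.not_eq_true _ |>.mp h)

-- ===== VERDICT (by name: the statement is the Claim_ definition above) =====
theorem calculate_btec_points_spec : Claim_equal_calculate_btec_points := by
  intro grades _
  unfold Spec_calculate_btec_points
  by_cases h : grades.toList = []
  · simp [calculate_btec_points, calculate_btec_points_alt, h, PySem.Chars.upper, pvBLoop]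
  · have h0 := pvMain (PySem.Chars.upper grades.toList).length (PySem.Chars.upper grades.toList) 0 le_rfl
    simpa [calculate_btec_points, calculate_btec_points_alt, h, pvBRes] using h0
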